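/- GENERATED by tools/from_farm_form.py from farm/worked/__asan_store2_noabort/Proof.lean (a worked proof of the farm's unit `__asan_store2_noabort`,
   accepted by the verdict) — do not edit. -/
import Asan.CheckWalk
import ProgX.Base.Spec.Units.asan_store2_noabort

open X86 X86.User Asan ProgX.Base

set_option maxRecDepth 4000
set_option maxHeartbeats 4000000

/-- `__asan_store2_noabort` (0x100560, asan_rt.c:89 `SMALL_CHECK(2)`) satisfies its contract `Asan.SmallCheck`: entered with two
accessible bytes it returns, changing only rax rcx rdx rsp and the flags; its paths into `__asan_report` are infeasible from
`AccessibleSmall`. -/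
theorem ProgX.Base.Spec.Proved.asan_store2_noabort_ok : ProgX.Base.Spec.asan_store2_noabort.Statement := by
  intro Lay hLay μ hμ u₀ hcode
  refine SmallCheck.mk' (by omega) (by decide) ?_
  intro u ret hrip hcodeOK hsp hret hretlt hacc
  obtain ⟨hsealed, hceil, hA⟩ := hacc
  -- the two shadow bytes the routine looks at (asan_rt.c:50 and asan_rt.c:27), and what `Accessible` says of them
  have hs1 := shadowOf_lt u.mem ((u.reg .rdi).toNat / 8)
  have hs2 := shadowOf_lt u.mem (((u.reg .rdi).toNat + 2 - 1) / 8)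
  have hfirst := fun h => hA.first_zero (by decide) h
  have hlast := hA.last_ok
  -- `lea rax, [rdi + 1]` (0x100569) does not wrap: the address is below the ceiling
  have e1 : (u.reg .rdi + 1).toNat = (u.reg .rdi).toNat + 1 := toNat_add_ofNat (u.reg .rdi) 1 (by omega)
  have r1 : u.mem.readLE (u.reg .rdi >>> 3 + 12582912) 1 = shadowOf u.mem ((u.reg .rdi).toNat / 8) := readLE_shadow _ _
  have r2 : u.mem.readLE ((u.reg .rdi + 1) >>> 3 + 12582912) 1 = shadowOf u.mem (((u.reg .rdi).toNat + 2 - 1) / 8) := by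
    have e2 : (u.reg .rdi).toNat + 2 - 1 = (u.reg .rdi).toNat + 1 := by omega
    rw [readLE_shadow, e1, e2]
  generalize shadowOf u.mem ((u.reg .rdi).toNat / 8) = s1 at *
  generalize shadowOf u.mem (((u.reg .rdi).toNat + 2 - 1) / 8) = s2 at *
  -- (a fact about the vector registers, so that the walk tracks them: `Checked.zmm`)
  have hzmm : u.zmm = u.zmm := rfl
  -- 0x100560 … 0x10059b: one walk over all paths
  u_walk hcode [hμ.vendor] span [ProgX.Base.L.textLo, ProgX.Base.L.textHi] side (v_side)
  all_goals first
    | -- a returning path (`ret` at 0x10059b): the state after the `ret` is `Checked`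
      (refine ReachVia.done ⟨w_rip, w_rsp, RegsKept.mono_all w_kept (by rfl), w_mem, w_zmm, w_mxcsr, ?_⟩
       rw [w_flags]
       exact X86.User.df_setStatus _ _)
    | -- a failing path (its side conditions, and the state at `__asan_report`, 0x10059c): infeasible, the bytes are accessible
      (exfalso
       simp only [toNat_shr3, e1, byte_toNat _ hs2, byte_toInt _ hs2, and7_toInt, part32_toNat] at *
       omega)
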